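-- pv_equiv track=rewrite | github.com/bheil123/crossplay | lookahead_3ply.py | _limit_blanks
-- ===== SOURCE A (Python) =====
-- def _limit_blanks(tiles: str, max_blanks: int = 1) -> str:
--     """Limit blanks in tile string to avoid exponential blowup."""
--     result = []
--     blank_count = 0
--     for t in tiles:
--         if t == '?':
--             if blank_count < max_blanks:
--                 result.append(t)
--                 blank_count += 1
--         else:
--             result.append(t)
--     return ''.join(result)
-- ===== SOURCE B (Python) =====
-- def _limit_blanks(tiles: str, max_blanks: int = 1) -> str:
--     """Limit blanks in tile string: index blank positions, then drop by rank."""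
--     blank_positions = [i for i, t in enumerate(tiles) if t == '?']
--     drop = {i for rank, i in enumerate(blank_positions) if rank >= max_blanks}
--     return ''.join(t for i, t in enumerate(tiles) if i not in drop)
-- ===== Notes on version B (the rewrite author's own statement) =====
-- stated objective: alternative
-- what changed: Replaces the running-blank-counter single pass by a position-indexing scheme: collect the indices of all blank characters, form the set of indices whose rank is at least max_blanks, and rebuild the string by filtering out those positions.
import Mathlib
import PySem

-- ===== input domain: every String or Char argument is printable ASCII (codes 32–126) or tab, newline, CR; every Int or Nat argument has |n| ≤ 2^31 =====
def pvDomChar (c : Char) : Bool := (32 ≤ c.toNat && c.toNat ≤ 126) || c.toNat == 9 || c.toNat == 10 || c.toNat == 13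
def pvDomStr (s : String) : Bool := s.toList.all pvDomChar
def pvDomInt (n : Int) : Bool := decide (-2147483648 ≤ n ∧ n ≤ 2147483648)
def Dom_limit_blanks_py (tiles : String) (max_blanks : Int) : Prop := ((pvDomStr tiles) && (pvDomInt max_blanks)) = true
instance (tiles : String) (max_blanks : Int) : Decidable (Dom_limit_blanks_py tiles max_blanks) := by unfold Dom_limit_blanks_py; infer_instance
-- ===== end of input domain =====

-- B replaces A's running-blank-counter single pass by indexing the '?' positions and
-- filtering out the positions whose rank is >= max_blanks (alternative decomposition, same cost).

-- ===== PORT A =====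
-- Literal port of A: one loop over the characters with (result, blank_count) as state.
def limit_blanks_py (tiles : String) (max_blanks : Int) : String :=
  let st := tiles.toList.foldl
    (fun (st : List Char × Int) t =>
      if t = '?' then
        if st.2 < max_blanks then (st.1 ++ [t], st.2 + 1) else st
      else (st.1 ++ [t], st.2))
    ([], 0)
  String.ofList st.1

-- ===== PORT B =====
-- Literal port of B: blank positions, drop set by rank, filter by position.
def limit_blanks_py_alt (tiles : String) (max_blanks : Int) : String :=
  let cs := tiles.toList
  let blank_positions : List Int :=
    (PySem.List.enumerate cs).filterMap (fun p => if p.2 = '?' then some p.1 else none)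
  let drop : PySem.Set Int :=
    PySem.Set.ofList ((PySem.List.enumerate blank_positions).filterMap
      (fun p => if max_blanks ≤ p.1 then some p.2 else none))
  String.ofList ((PySem.List.enumerate cs).filterMap
    (fun p => if PySem.Set.contains drop p.1 then none else some p.2))

-- ===== PRECONDITION & SPEC =====
def Spec_limit_blanks_py (tiles : String) (max_blanks : Int) (out : String) : Prop := out = limit_blanks_py_alt tiles max_blanks
instance (tiles : String) (max_blanks : Int) (out : String) : Decidable (Spec_limit_blanks_py tiles max_blanks out) := by unfold Spec_limit_blanks_py; infer_instance

-- ===== CLAIM (what is proved, stated in full; the proofs are below) =====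
def Claim_equal_limit_blanks_py : Prop := ∀ (tiles : String) (max_blanks : Int), Dom_limit_blanks_py tiles max_blanks → Spec_limit_blanks_py tiles max_blanks (limit_blanks_py tiles max_blanks)

-- ===== LEMMAS AND PROOFS =====

-- Reference function: keep each '?' of rank r (number of earlier '?'s) iff r < m.
def pvKeep (m : Int) : List Char → Nat → List Char
  | [], _ => []
  | t :: ts, r =>
      if t = '?' then
        if (r : Int) < m then t :: pvKeep m ts (r + 1) else pvKeep m ts (r + 1)
      else t :: pvKeep m ts r

def pvClamp (m : Int) (r : Nat) : Int := max 0 (min (r : Int) m)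

lemma pvA_fold (m : Int) : ∀ (cs : List Char) (acc : List Char) (r : Nat),
    (cs.foldl
      (fun (st : List Char × Int) t =>
        if t = '?' then
          if st.2 < m then (st.1 ++ [t], st.2 + 1) else st
        else (st.1 ++ [t], st.2))
      (acc, pvClamp m r)).1 = acc ++ pvKeep m cs r := by
  intro cs
  induction cs with
  | nil => intro acc r; simp [pvKeep]
  | cons t ts ih =>
    intro acc r
    rw [List.foldl_cons]
    by_cases h : t = '?'
    · subst h
      dsimp only
      rw [if_pos rfl]
      by_cases hr : (r : Int) < m
      · have hc : pvClamp m r < m := by unfold pvClamp; omega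
        have hc1 : pvClamp m r + 1 = pvClamp m (r + 1) := by unfold pvClamp; push_cast; omega
        rw [if_pos hc, hc1, ih]
        simp [pvKeep, hr]
      · have hc : ¬ pvClamp m r < m := by unfold pvClamp; omega
        have hc1 : pvClamp m r = pvClamp m (r + 1) := by unfold pvClamp; push_cast; omega
        rw [if_neg hc, hc1, ih]
        simp [pvKeep, hr]
    · dsimp only
      rw [if_neg h, ih]
      simp [pvKeep, h]

def pvBlanks (cs : List Char) (s : Int) : List Int :=
  (PySem.List.enumerate cs s).filterMap (fun p => if p.2 = '?' then some p.1 else none)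

def pvDrop (m : Int) (bl : List Int) (r : Int) : List Int :=
  (PySem.List.enumerate bl r).filterMap (fun p => if m ≤ p.1 then some p.2 else none)

lemma pvBlanks_cons (t : Char) (ts : List Char) (s : Int) :
    pvBlanks (t :: ts) s = (if t = '?' then [s] else []) ++ pvBlanks ts (s + 1) := by
  by_cases h : t = '?' <;> simp [pvBlanks, PySem.List.enumerate_cons, h]

lemma pvDrop_cons (m : Int) (i : Int) (bl : List Int) (r : Int) :
    pvDrop m (i :: bl) r = (if m ≤ r then [i] else []) ++ pvDrop m bl (r + 1) := by
  by_cases h : m ≤ r <;> simp [pvDrop, PySem.List.enumerate_cons, h]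

lemma pvBlanks_ge (cs : List Char) (s : Int) : ∀ j ∈ pvBlanks cs s, s ≤ j := by
  induction cs generalizing s with
  | nil => simp [pvBlanks]
  | cons t ts ih =>
    intro j hj
    rw [pvBlanks_cons] at hj
    rcases List.mem_append.1 hj with h1 | h1
    · by_cases h : t = '?' <;> simp [h] at h1; omega
    · have := ih (s + 1) j h1; omega

lemma pvDrop_subset (m : Int) (bl : List Int) (r : Int) : ∀ j ∈ pvDrop m bl r, j ∈ bl := by
  induction bl generalizing r with
  | nil => simp [pvDrop]
  | cons i bl ih =>
    intro j hj
    rw [pvDrop_cons] at hj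
    rcases List.mem_append.1 hj with h1 | h1
    · by_cases h : m ≤ r <;> simp [h] at h1; simp [h1]
    · exact List.mem_cons_of_mem _ (ih (r + 1) j h1)

lemma pvDrop_ge (m : Int) (cs : List Char) (s r : Int) :
    ∀ j ∈ pvDrop m (pvBlanks cs s) r, s ≤ j :=
  fun j hj => pvBlanks_ge cs s j (pvDrop_subset m _ r j hj)

lemma pvContains_ofList (L : List Int) (x : Int) :
    PySem.Set.contains (PySem.Set.ofList L) x = decide (x ∈ L) := by
  by_cases hx : x ∈ L
  · simp only [hx, decide_true]
    exact (PySem.Set.contains_iff ..).mpr ((PySem.Set.mem_ofList ..).mpr hx)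
  · simp only [hx, decide_false]
    rw [← Bool.not_eq_true]
    intro hc
    exact hx ((PySem.Set.mem_ofList ..).mp ((PySem.Set.contains_iff ..).mp hc))

-- B filters by plain-list membership in the drop list = the rank-counting pvKeep.
lemma pvB_keep' (m : Int) : ∀ (cs : List Char) (s : Int) (r : Nat),
    (PySem.List.enumerate cs s).filterMap
      (fun p => if p.1 ∈ pvDrop m (pvBlanks cs s) (r : Int) then none else some p.2)
      = pvKeep m cs r := by
  intro cs
  induction cs with
  | nil => intro s r; simp [pvKeep, PySem.List.enumerate_nil]
  | cons t ts ih =>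
    intro s r
    rw [PySem.List.enumerate_cons]
    have hge : ∀ p ∈ PySem.List.enumerate ts (s + 1), s + 1 ≤ (p : Int × Char).1 := by
      intro p hp
      rcases (PySem.List.mem_enumerate_iff ..).1 hp with ⟨k, hk, rfl⟩
      simp
    by_cases h : t = '?'
    · subst h
      rw [pvBlanks_cons, if_pos rfl, List.singleton_append, pvDrop_cons]
      have hcast : (r : Int) + 1 = ((r + 1 : Nat) : Int) := by push_cast; ring
      by_cases hm : m ≤ (r : Int)
      · rw [if_pos hm, List.singleton_append, List.filterMap_cons]
        have hhead : s ∈ s :: pvDrop m (pvBlanks ts (s + 1)) ((r : Int) + 1) :=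
          List.mem_cons_self ..
        rw [if_pos hhead]
        have hcongr : (PySem.List.enumerate ts (s + 1)).filterMap
            (fun p => if p.1 ∈ s :: pvDrop m (pvBlanks ts (s + 1)) ((r : Int) + 1)
                      then none else some p.2)
            = (PySem.List.enumerate ts (s + 1)).filterMap
            (fun p => if p.1 ∈ pvDrop m (pvBlanks ts (s + 1)) ((r + 1 : Nat) : Int)
                      then none else some p.2) := by
          apply List.filterMap_congr
          intro p hp
          have hps := hge p hp
          have hne : p.1 ≠ s := by omega
          rw [← hcast]
          by_cases hx : p.1 ∈ pvDrop m (pvBlanks ts (s + 1)) ((r : Int) + 1)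
          · rw [if_pos (List.mem_cons_of_mem _ hx), if_pos hx]
          · rw [if_neg (by simp [hne, hx]), if_neg hx]
        rw [hcongr, ih, pvKeep, if_pos rfl, if_neg (by omega)]
      · rw [if_neg hm, List.nil_append, List.filterMap_cons]
        have hhead : s ∉ pvDrop m (pvBlanks ts (s + 1)) ((r : Int) + 1) := by
          intro hc; have := pvDrop_ge m ts (s + 1) ((r : Int) + 1) s hc; omega
        rw [if_neg hhead, hcast, ih, pvKeep, if_pos rfl, if_pos (by omega)]
    · rw [pvBlanks_cons, if_neg h, List.nil_append, List.filterMap_cons]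
      have hhead : s ∉ pvDrop m (pvBlanks ts (s + 1)) (r : Int) := by
        intro hc; have := pvDrop_ge m ts (s + 1) (r : Int) s hc; omega
      rw [if_neg hhead, ih, pvKeep, if_neg h]

lemma pvB_keep (m : Int) (cs : List Char) (r : Nat) :
    (PySem.List.enumerate cs 0).filterMap
      (fun p => if PySem.Set.contains
                    (PySem.Set.ofList (pvDrop m (pvBlanks cs 0) (r : Int))) p.1
                then none else some p.2)
      = pvKeep m cs r := by
  rw [← pvB_keep' m cs 0 r]
  apply List.filterMap_congr
  intro p _
  rw [pvContains_ofList]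
  by_cases hx : p.1 ∈ pvDrop m (pvBlanks cs 0) (r : Int) <;> simp [hx]

-- ===== VERDICT (by name: the statement is the Claim_ definition above) =====
theorem limit_blanks_py_spec : Claim_equal_limit_blanks_py := by
  intro tiles m _
  unfold Spec_limit_blanks_py limit_blanks_py limit_blanks_py_alt
  have hA := pvA_fold m tiles.toList [] 0
  have h0 : pvClamp m 0 = 0 := by unfold pvClamp; push_cast; omega
  rw [h0] at hA
  have hB := pvB_keep m tiles.toList 0
  simp only [pvBlanks, pvDrop, Nat.cast_zero] at hB
  simp only [hA, hB, List.nil_append]
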